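-- pv_equiv track=rewrite | github.com/ShariarAlamDipto/grademax | scripts/segment_human_biology_papers.py | ranges_from_starts
-- ===== SOURCE A (Python) =====
-- def ranges_from_starts(starts: dict, total_pages: int) -> dict:
--     if not starts:
--         return {}
--     sorted_s = sorted(starts.items())
--     questions = {}
--     for i, (q_num, start_page) in enumerate(sorted_s):
--         end_page = sorted_s[i + 1][1] - 1 if i + 1 < len(sorted_s) else total_pages - 1
--         questions[q_num] = list(range(start_page, end_page + 1))
--     return questions
-- ===== SOURCE B (Python) =====
-- def ranges_from_starts(starts: dict, total_pages: int) -> dict: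
--     if not starts:
--         return {}
--     pairs = []
--     boundary = total_pages - 1
--     for q_num, start_page in reversed(sorted(starts.items())):
--         pairs.append((q_num, list(range(start_page, boundary + 1))))
--         boundary = start_page - 1
--     return dict(reversed(pairs))
-- ===== Notes on version B (the rewrite author's own statement) =====
-- stated objective: alternative
-- what changed: Replaces the forward pass that looks ahead at sorted_s[i+1] (with an i+1<len guard) by a single backward pass that threads the upper page boundary as an accumulator, building the result list front-to-back by prepending.
import Mathlib
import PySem

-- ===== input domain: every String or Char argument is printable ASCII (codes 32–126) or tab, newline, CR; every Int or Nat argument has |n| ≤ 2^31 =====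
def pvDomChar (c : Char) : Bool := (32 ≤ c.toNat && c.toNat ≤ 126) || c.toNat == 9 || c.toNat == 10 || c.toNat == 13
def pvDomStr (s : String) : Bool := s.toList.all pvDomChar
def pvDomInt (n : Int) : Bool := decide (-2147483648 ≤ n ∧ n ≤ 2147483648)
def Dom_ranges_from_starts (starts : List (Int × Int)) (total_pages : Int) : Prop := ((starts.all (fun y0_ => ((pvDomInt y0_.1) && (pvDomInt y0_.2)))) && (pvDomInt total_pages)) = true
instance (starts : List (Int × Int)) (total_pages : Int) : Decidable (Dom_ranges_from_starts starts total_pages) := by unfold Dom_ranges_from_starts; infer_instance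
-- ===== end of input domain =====

-- B replaces A's forward pass with sorted_s[i+1] look-ahead by one backward pass threading the upper boundary as an accumulator.


-- ===== PORT A =====
-- starts is a Python dict (assoc list under the type convention): build the PySem.Dict first.
def ranges_from_starts (starts : List (Int × Int)) (total_pages : Int) : List (Int × List Int) :=
  let d := PySem.Dict.ofList starts
  if d.items = [] then []
  else
    let sorted_s := PySem.List.sorted2 d.items (fun p => p.1) (fun p => p.2)
    let questions := (PySem.List.enumerate sorted_s 0).foldl
      (fun (q : PySem.Dict Int (List Int)) ip =>
        let i := ip.1
        let q_num := ip.2.1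
        let start_page := ip.2.2
        let end_page : Int :=
          if i + 1 < (sorted_s.length : Int) then (PySem.List.pyGetD sorted_s (i + 1) (0, 0)).2 - 1
          else total_pages - 1
        q.insert q_num (PySem.List.pyRange start_page (end_page + 1) 1))
      PySem.Dict.empty
    questions.items

-- ===== PORT B =====
-- one backward pass over reversed(sorted(items)) appending pairs; dict(reversed(pairs)) at the end.
def ranges_from_starts_alt (starts : List (Int × Int)) (total_pages : Int) : List (Int × List Int) :=
  let d := PySem.Dict.ofList starts
  if d.items = [] then []
  else
    let st := (PySem.List.sorted2 d.items (fun p => p.1) (fun p => p.2)).reverse.foldl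
      (fun (st : Int × List (Int × List Int)) (p : Int × Int) =>
        (p.2 - 1, st.2 ++ [(p.1, PySem.List.pyRange p.2 (st.1 + 1) 1)]))
      (total_pages - 1, [])
    (PySem.Dict.ofList st.2.reverse).items

-- ===== PRECONDITION & SPEC =====
def Spec_ranges_from_starts (starts : List (Int × Int)) (total_pages : Int) (out : List (Int × List Int)) : Prop := out = ranges_from_starts_alt starts total_pages
instance (starts : List (Int × Int)) (total_pages : Int) (out : List (Int × List Int)) : Decidable (Spec_ranges_from_starts starts total_pages out) := by unfold Spec_ranges_from_starts; infer_instance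

-- ===== CLAIM (what is proved, stated in full; the proofs are below) =====
def Claim_equal_ranges_from_starts : Prop := ∀ (starts : List (Int × Int)) (total_pages : Int), Dom_ranges_from_starts starts total_pages → Spec_ranges_from_starts starts total_pages (ranges_from_starts starts total_pages)

-- ===== LEMMAS AND PROOFS =====

-- the boundary the question before `l` ends at: start of l's head minus 1, or b if l is empty
def nextStop : List (Int × Int) → Int → Int
  | [], b => b
  | (_, s) :: _, _ => s - 1

-- the common shape of both results: per-question ranges with threaded boundary
def specGo : List (Int × Int) → Int → List (Int × List Int)
  | [], _ => []
  | p :: rest, b => (p.1, PySem.List.pyRange p.2 (nextStop rest b + 1)) :: specGo rest b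

theorem length_specGo (l : List (Int × Int)) (b : Int) : (specGo l b).length = l.length := by
  induction l generalizing b with
  | nil => rfl
  | cons p rest ih => simp [specGo, ih]

theorem map_fst_specGo (l : List (Int × Int)) (b : Int) :
    (specGo l b).map (fun p => p.1) = l.map (fun p => p.1) := by
  induction l generalizing b with
  | nil => rfl
  | cons p rest ih => simp [specGo, ih]

theorem getElem_specGo (l : List (Int × Int)) (b : Int) (i : Nat) (h : i < l.length)
    (h' : i < (specGo l b).length) :
    (specGo l b)[i] =
      (l[i].1, PySem.List.pyRange l[i].2
        ((if h2 : i + 1 < l.length then l[i + 1].2 - 1 else b) + 1)) := by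
  induction l generalizing b i with
  | nil => simp at h
  | cons p rest ih =>
    cases i with
    | zero =>
      cases rest with
      | nil => simp [specGo, nextStop]
      | cons q t => simp [specGo, nextStop]
    | succ j =>
      have hj : j < rest.length := by simpa using h
      have hj' : j < (specGo rest b).length := by rw [length_specGo]; exact hj
      have := ih b j hj hj'
      simp only [specGo, List.getElem_cons_succ]
      rw [this]
      simp

-- B's backward fold computes (nextStop l b, (specGo l b).reverse)
theorem foldB (l : List (Int × Int)) (b : Int) :
    l.reverse.foldl
      (fun (st : Int × List (Int × List Int)) (p : Int × Int) =>
        (p.2 - 1, st.2 ++ [(p.1, PySem.List.pyRange p.2 (st.1 + 1) 1)]))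
      (b, []) = (nextStop l b, (specGo l b).reverse) := by
  induction l generalizing b with
  | nil => rfl
  | cons p rest ih =>
    obtain ⟨q, s⟩ := p
    simp only [List.reverse_cons, List.foldl_append, ih, List.foldl_cons, List.foldl_nil,
      specGo]
    rfl

-- dict(pairs) returns pairs unchanged when the keys are distinct
theorem items_ofList_of_nodup (ps : List (Int × List Int))
    (h : (ps.map (fun p => p.1)).Nodup) : (PySem.Dict.ofList ps).items = ps := by
  have := PySem.Dict.items_foldl_insert_fresh ps (fun p => p.1) (fun p => p.2)
    (PySem.Dict.empty : PySem.Dict Int (List Int))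
    (fun a _ => PySem.Dict.contains_empty a.1) h
  simpa [PySem.Dict.ofList, PySem.Dict.update] using this

-- A's insert loop over the enumerated sorted list appends one item per question
theorem A_items (asc : List (Int × Int)) (total_pages : Int)
    (hnd : (asc.map (fun p => p.1)).Nodup) :
    ((PySem.List.enumerate asc 0).foldl
      (fun (q : PySem.Dict Int (List Int)) ip =>
        q.insert ip.2.1 (PySem.List.pyRange ip.2.2
          ((if ip.1 + 1 < (asc.length : Int) then (PySem.List.pyGetD asc (ip.1 + 1) (0, 0)).2 - 1
            else total_pages - 1) + 1) 1))
      PySem.Dict.empty).items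
    = (PySem.List.enumerate asc 0).map
        (fun ip => (ip.2.1, PySem.List.pyRange ip.2.2
          ((if ip.1 + 1 < (asc.length : Int) then (PySem.List.pyGetD asc (ip.1 + 1) (0, 0)).2 - 1
            else total_pages - 1) + 1) 1)) := by
  have hk : ((PySem.List.enumerate asc 0).map (fun ip => ip.2.1)).Nodup := by
    have heq : (PySem.List.enumerate asc 0).map (fun ip => ip.2.1)
        = ((PySem.List.enumerate asc 0).map (fun ip => ip.2)).map (fun p => p.1) := by
      rw [List.map_map]; rfl
    rw [heq, PySem.List.map_snd_enumerate]
    exact hnd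
  have := PySem.Dict.items_foldl_insert_fresh (PySem.List.enumerate asc 0)
    (fun ip => ip.2.1)
    (fun ip => PySem.List.pyRange ip.2.2
      ((if ip.1 + 1 < (asc.length : Int) then (PySem.List.pyGetD asc (ip.1 + 1) (0, 0)).2 - 1
        else total_pages - 1) + 1) 1)
    (PySem.Dict.empty : PySem.Dict Int (List Int))
    (fun a _ => PySem.Dict.contains_empty a.2.1) hk
  simpa using this

-- the enumerated-map with look-ahead equals specGo
theorem A_map_eq_specGo (asc : List (Int × Int)) (b : Int) :
    (PySem.List.enumerate asc 0).map
      (fun ip => (ip.2.1, PySem.List.pyRange ip.2.2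
        ((if ip.1 + 1 < (asc.length : Int) then (PySem.List.pyGetD asc (ip.1 + 1) (0, 0)).2 - 1
          else b) + 1) 1))
    = specGo asc b := by
  apply List.ext_getElem
  · simp [PySem.List.length_enumerate, length_specGo]
  · intro i h1 h2
    have hi : i < asc.length := by simpa [PySem.List.length_enumerate] using h1
    have he : i < (PySem.List.enumerate asc 0).length := by
      simpa [PySem.List.length_enumerate] using hi
    rw [List.getElem_map, PySem.List.getElem_enumerate asc 0 i he,
        getElem_specGo asc b i hi h2]
    simp only [zero_add]
    by_cases hlt : i + 1 < asc.length
    · have hc : ((i : Int) + 1) < (asc.length : Int) := by exact_mod_cast hlt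
      have hget : PySem.List.pyGetD asc ((i : Int) + 1) (0, 0) = asc[i + 1] := by
        rw [PySem.List.pyGetD_eq_getElem asc (0, 0) (by positivity) (by exact_mod_cast hlt)]
        have ht : ((i : Int) + 1).toNat = i + 1 := by omega
        simp [ht]
      rw [if_pos hc, dif_pos hlt, hget]
    · have hc : ¬ ((i : Int) + 1 < (asc.length : Int)) := by exact_mod_cast hlt
      rw [if_neg hc, dif_neg hlt]

-- ===== VERDICT (by name: the statement is the Claim_ definition above) =====
theorem ranges_from_starts_spec : Claim_equal_ranges_from_starts := by
  intro starts total_pages _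
  unfold Spec_ranges_from_starts ranges_from_starts ranges_from_starts_alt
  set d := PySem.Dict.ofList starts with hd
  by_cases hne : d.items = []
  · simp [hne]
  · simp only [if_neg hne]
    set asc := PySem.List.sorted2 d.items (fun p => p.1) (fun p => p.2) with hasc
    have hnd : (asc.map (fun p => p.1)).Nodup := by
      have hperm : asc.Perm d.items := PySem.List.sorted2_perm _ _ _ _
      have : (asc.map (fun p => p.1)).Perm (d.items.map (fun p => p.1)) := hperm.map _
      exact this.nodup_iff.mpr (PySem.Dict.nodup_keys_ofList starts)
    rw [foldB asc (total_pages - 1)]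
    simp only [List.reverse_reverse]
    have hB : (PySem.Dict.ofList (specGo asc (total_pages - 1))).items
        = specGo asc (total_pages - 1) := by
      apply items_ofList_of_nodup
      rw [map_fst_specGo]; exact hnd
    rw [hB]
    rw [A_items asc total_pages hnd, A_map_eq_specGo asc (total_pages - 1)]
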